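-- pv_equiv track=rewrite | github.com/zengle22/LEE-Lite | skills/ll-dev-proto-to-ui/scripts/proto_to_ui.py | _validate_structured_sections
-- ===== SOURCE A (Python) =====
-- def _collect_section_body(text: str, heading: str) -> str:
--     lines = text.splitlines()
--     try:
--         start = lines.index(heading) + 1
--     except ValueError:
--         return ""
--     body: list[str] = []
--     for line in lines[start:]:
--         if line.startswith("## "):
--             break
--         if line.strip():
--             body.append(line.strip())
--     return "\n".join(body).strip()
--
-- def _validate_structured_sections(text: str, label: str, headings: tuple[str, ...]) -> list[str]:
--     errors: list[str] = []
--     for heading in headings: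
--         if heading not in text:
--             errors.append(f"{label} missing section: {heading}")
--             continue
--         if not _collect_section_body(text, heading):
--             errors.append(f"{label} section has no content: {heading}")
--     return errors
-- ===== SOURCE B (Python) =====
-- def _validate_structured_sections(text: str, label: str, headings: tuple[str, ...]) -> list[str]:
--     # One backward pass over the lines: `has_content` holds, for each distinct line,
--     # whether a non-blank line follows its FIRST occurrence before the next "## " line
--     # (backward overwriting makes the earliest occurrence win); the headings loop then
--     # needs no per-heading rescan of the text.
--     lines = text.splitlines()
--     has_content = {}
--     nonblank_ahead = False  # non-blank line below current position, before next "## "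
--     for line in reversed(lines):
--         has_content[line] = nonblank_ahead
--         if line.startswith("## "):
--             nonblank_ahead = False
--         elif line.strip():
--             nonblank_ahead = True
--     errors = []
--     for heading in headings:
--         if heading not in text:
--             errors.append(f"{label} missing section: {heading}")
--         elif not has_content.get(heading, False):
--             errors.append(f"{label} section has no content: {heading}")
--     return errors
-- ===== Notes on version B (the rewrite author's own statement) =====
-- stated objective: alternative
-- what changed: A rescans the text per heading (lines.index plus a slice-and-collect loop to test for body content); B does one backward pass over the lines building a dict from each distinct line to whether its first occurrence is followed by non-blank content before the next '## ' line, so the headings loop needs no per-heading body rescan (the retained per-heading substring test still dominates the runtime, so no speedup is claimed).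
import Mathlib
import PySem

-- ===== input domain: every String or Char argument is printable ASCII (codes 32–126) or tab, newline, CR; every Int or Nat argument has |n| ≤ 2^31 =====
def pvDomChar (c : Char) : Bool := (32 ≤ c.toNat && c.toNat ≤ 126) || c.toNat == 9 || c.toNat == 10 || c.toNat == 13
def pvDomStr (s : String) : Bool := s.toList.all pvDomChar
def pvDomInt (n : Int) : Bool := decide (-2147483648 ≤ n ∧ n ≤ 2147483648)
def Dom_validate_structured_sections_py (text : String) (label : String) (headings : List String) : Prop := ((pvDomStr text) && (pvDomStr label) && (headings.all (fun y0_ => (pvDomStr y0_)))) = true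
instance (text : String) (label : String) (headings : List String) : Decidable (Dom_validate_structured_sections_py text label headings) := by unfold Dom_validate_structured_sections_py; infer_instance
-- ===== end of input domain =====

-- B replaces A's per-heading index+slice+collect rescans by ONE backward pass over the
-- lines that records, per distinct line, whether its first occurrence is followed by
-- content before the next "## " line (objective: alternative; the kept per-heading
-- substring test still dominates, so no speed is claimed).

-- ===== PORT A =====
-- the 'for line in lines[start:]' loop of _collect_section_body (break on "## ")
def pvCollectLoop (ls : List String) (body : List String) : List String :=
  match ls with
  | [] => body
  | l :: rest =>
    if PySem.Str.startswith l "## " then body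
    else if PySem.Str.strip l ≠ "" then pvCollectLoop rest (body ++ [PySem.Str.strip l])
    else pvCollectLoop rest body

-- _collect_section_body
def pvCollectSectionBody (text : String) (heading : String) : String :=
  let lines := PySem.Str.splitlines text
  match PySem.List.index? lines heading with
  | none => ""
  | some idx =>
      PySem.Str.strip (PySem.Str.join "\n"
        (pvCollectLoop (PySem.List.slice lines (some ((idx : Int) + 1)) none) []))

def validate_structured_sections_py (text : String) (label : String) (headings : List String) : List String :=
  headings.foldl (fun errors heading =>
    if PySem.Str.isIn heading text = false then
      errors ++ [label ++ " missing section: " ++ heading]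
    else if pvCollectSectionBody text heading = "" then
      errors ++ [label ++ " section has no content: " ++ heading]
    else errors) []

-- ===== PORT B =====
-- the 'for line in reversed(lines)' pass: dict line ↦ nonblank_ahead, plus the flag
-- (a reversed for-loop is a right fold: the head line is processed last)
def pvScan : List String → PySem.Dict String Bool × Bool
  | [] => (PySem.Dict.empty, false)
  | l :: rest =>
    let s := pvScan rest
    (s.1.insert l s.2,
     if PySem.Str.startswith l "## " then false
     else if PySem.Str.strip l ≠ "" then true
     else s.2)

def validate_structured_sections_py_alt (text : String) (label : String) (headings : List String) : List String :=
  headings.foldl (fun errors heading =>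
    if PySem.Str.isIn heading text = false then
      errors ++ [label ++ " missing section: " ++ heading]
    else if PySem.Dict.getD (pvScan (PySem.Str.splitlines text)).1 heading false = false then
      errors ++ [label ++ " section has no content: " ++ heading]
    else errors) []

-- ===== PRECONDITION & SPEC =====
def Spec_validate_structured_sections_py (text : String) (label : String) (headings : List String) (out : List String) : Prop := out = validate_structured_sections_py_alt text label headings
instance (text : String) (label : String) (headings : List String) (out : List String) : Decidable (Spec_validate_structured_sections_py text label headings out) := by unfold Spec_validate_structured_sections_py; infer_instance

-- ===== CLAIM (what is proved, stated in full; the proofs are below) =====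
def Claim_equal_validate_structured_sections_py : Prop := ∀ (text : String) (label : String) (headings : List String), Dom_validate_structured_sections_py text label headings → Spec_validate_structured_sections_py text label headings (validate_structured_sections_py text label headings)

-- ===== LEMMAS AND PROOFS =====

-- the collect loop's accumulator only prepends
theorem pvCollectLoop_acc (ls : List String) (body : List String) :
    pvCollectLoop ls body = body ++ pvCollectLoop ls [] := by
  induction ls generalizing body with
  | nil => simp [pvCollectLoop]
  | cons l rest ih =>
    simp only [pvCollectLoop]
    split
    · simp
    · split
      · rw [ih (body ++ _), ih ([] ++ _)]; simp
      · rw [ih body]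

-- the scan flag is false exactly when the collect loop gathers nothing
theorem pvScan_snd_false_iff (ls : List String) :
    (pvScan ls).2 = false ↔ pvCollectLoop ls [] = [] := by
  induction ls with
  | nil => simp [pvScan, pvCollectLoop]
  | cons l rest ih =>
    simp only [pvScan, pvCollectLoop]
    split
    · simp
    · split
      · rw [pvCollectLoop_acc]; simp
      · simpa using ih

-- every collected element is a stripped, non-empty string
theorem pvCollectLoop_mem (ls : List String) :
    ∀ e ∈ pvCollectLoop ls [], (∃ l, e = PySem.Str.strip l) ∧ e ≠ "" := by
  induction ls with
  | nil => simp [pvCollectLoop]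
  | cons l rest ih =>
    simp only [pvCollectLoop]
    split
    · simp
    · split
      · rename_i hne
        rw [pvCollectLoop_acc]
        intro e he
        rcases List.mem_append.1 he with h | h
        · simp at h; exact ⟨⟨l, h⟩, h ▸ hne⟩
        · exact ih e h
      · exact ih

-- a non-empty stripped char list starts with a non-space character
theorem strip_head_not_space (w : List Char) (h : PySem.Chars.strip w ≠ []) :
    ∃ c t, PySem.Chars.strip w = c :: t ∧ PySem.Chars.isspace c = false := by
  unfold PySem.Chars.strip PySem.Chars.rstrip PySem.Chars.lstrip at *
  set x := List.dropWhile PySem.Chars.isspace w with hx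
  have hpre : (List.dropWhile PySem.Chars.isspace x.reverse).reverse <+: x := by
    have hs : List.dropWhile PySem.Chars.isspace x.reverse <:+ x.reverse :=
      List.dropWhile_suffix _
    have := hs.reverse
    simpa using this
  rcases hne : (List.dropWhile PySem.Chars.isspace x.reverse).reverse with _ | ⟨c, t⟩
  · exact absurd hne h
  · refine ⟨c, t, rfl, ?_⟩
    rw [hne] at hpre
    rcases hpre with ⟨suf, hsuf⟩
    have hx0 : x = c :: (t ++ suf) := by rw [← hsuf]; simp
    have := List.head?_dropWhile_not PySem.Chars.isspace w
    rw [← hx, hx0] at this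
    simpa using this

-- stripping a string that starts with a non-space character is non-empty
theorem strip_cons_not_space (c : Char) (t : List Char) (hc : PySem.Chars.isspace c = false) :
    PySem.Chars.strip (c :: t) ≠ [] := by
  unfold PySem.Chars.strip PySem.Chars.lstrip PySem.Chars.rstrip
  rw [List.dropWhile_cons_of_neg (by simp [hc])]
  intro h
  have h2 : List.dropWhile PySem.Chars.isspace (c :: t).reverse = [] := by
    simpa using congrArg List.reverse h
  have := (List.dropWhile_eq_nil_iff).1 h2 c (by simp)
  simp [hc] at this

-- '\n'.join(body).strip() is empty iff body is empty, for stripped non-empty parts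
theorem strip_join_eq_empty_iff (body : List String)
    (h : ∀ e ∈ body, (∃ l, e = PySem.Str.strip l) ∧ e ≠ "") :
    (PySem.Str.strip (PySem.Str.join "\n" body) = "") ↔ body = [] := by
  constructor
  · intro hs
    rcases body with _ | ⟨e, rest⟩
    · rfl
    · exfalso
      rcases h e (by simp) with ⟨⟨l, hl⟩, hne⟩
      have hel : e.toList = PySem.Chars.strip l.toList := by
        rw [hl]; simp [PySem.Str.strip]
      have hnil : PySem.Chars.strip l.toList ≠ [] := by
        rw [← hel]; intro hh
        exact hne (by simpa using congrArg String.ofList hh)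
      rcases strip_head_not_space l.toList hnil with ⟨c, t, hct, hc⟩
      have hjoin : ∃ r, (PySem.Str.join "\n" (e :: rest)).toList = c :: (t ++ r) := by
        simp only [PySem.Str.join, String.toList_ofList, PySem.Chars.join]
        rcases rest with _ | ⟨f, rs⟩
        · exact ⟨[], by simp [List.intercalate, hel, hct]⟩
        · refine ⟨'\n' :: (List.intercalate "\n".toList (f.toList :: rs.map String.toList)), ?_⟩
          simp [List.intercalate, hel, hct]
      rcases hjoin with ⟨r, hr⟩
      have : PySem.Chars.strip ((PySem.Str.join "\n" (e :: rest)).toList) ≠ [] := by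
        rw [hr]; exact strip_cons_not_space c (t ++ r) hc
      apply this
      have := congrArg String.toList hs
      simpa [PySem.Str.strip] using this
  · intro hb; subst hb; rfl

-- the scan dict looks up the flag taken at the FIRST occurrence of h
theorem pvScan_get? (ls : List String) (h : String) :
    (pvScan ls).1.get? h =
      (PySem.List.index? ls h).map (fun i => (pvScan (ls.drop (i + 1))).2) := by
  induction ls with
  | nil => simp [pvScan, PySem.List.index?, PySem.Dict.empty, PySem.Dict.get?]
  | cons l rest ih =>
    by_cases hl : h = l
    · subst hl
      rw [show (pvScan (h :: rest)).1 = (pvScan rest).1.insert h (pvScan rest).2 from rfl]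
      rw [PySem.Dict.get?_insert_self, PySem.List.index?_cons_self]
      simp
    · rw [show (pvScan (l :: rest)).1 = (pvScan rest).1.insert l (pvScan rest).2 from rfl]
      rw [PySem.Dict.get?_insert_of_ne _ _ hl,
          PySem.List.index?_cons_of_ne rest (Ne.symm hl), ih]
      cases PySem.List.index? rest h <;> simp

-- key: A's emptiness test equals B's dict test, per heading
theorem pvKey (text : String) (heading : String) :
    (pvCollectSectionBody text heading = "") ↔
      (PySem.Dict.getD (pvScan (PySem.Str.splitlines text)).1 heading false = false) := by
  rcases hidx : PySem.List.index? (PySem.Str.splitlines text) heading with _ | i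
  · simp only [pvCollectSectionBody, hidx, PySem.Dict.getD, pvScan_get?, Option.map_none,
      Option.getD_none]
  · have hslice : PySem.List.slice (PySem.Str.splitlines text) (some ((i : Int) + 1)) none =
        (PySem.Str.splitlines text).drop (i + 1) := by
      rw [PySem.List.slice_from _ (by omega)]
      have h1 : ((i : Int) + 1).toNat = i + 1 := by omega
      rw [h1]
    simp only [pvCollectSectionBody, hidx, PySem.Dict.getD, pvScan_get?, hslice,
      Option.map_some, Option.getD_some]
    rw [strip_join_eq_empty_iff _ (pvCollectLoop_mem _), ← pvScan_snd_false_iff]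

-- ===== VERDICT (by name: the statement is the Claim_ definition above) =====
theorem validate_structured_sections_py_spec : Claim_equal_validate_structured_sections_py := by
  intro text label headings _
  unfold Spec_validate_structured_sections_py
  unfold validate_structured_sections_py validate_structured_sections_py_alt
  refine PySem.List.foldl_congr_mem _ _ _ _ (fun errors heading _ => ?_)
  by_cases hin : PySem.Str.isIn heading text = false
  · rw [if_pos hin, if_pos hin]
  · rw [if_neg hin, if_neg hin]
    by_cases hA : pvCollectSectionBody text heading = ""
    · rw [if_pos hA, if_pos ((pvKey text heading).1 hA)]
    · rw [if_neg hA, if_neg (fun hB => hA ((pvKey text heading).2 hB))]
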